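-- pv_equiv track=rewrite | github.com/BBN-E/Rapid-customization-events-acl19 | nlplingo/nlplingo/annotation/annotation_to_json.py | parse_filelist_line
-- ===== SOURCE A (Python) =====
-- def parse_filelist_line(line):
--     text_file = None
--     idt_file = None
--     enote_file = None
--
--     for file in line.strip().split():
--         if file.startswith('TEXT:'):
--             text_file = file[len('TEXT:'):]
--         elif file.startswith('IDT:'):
--             idt_file = file[len('IDT:'):]
--         elif file.startswith('ENOTE:'):
--             enote_file = file[len('ENOTE:'):]
--
--     if text_file is None:
--         raise ValueError('text file must be present!')
--     return (text_file, idt_file, enote_file)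
-- ===== SOURCE B (Python) =====
-- def parse_filelist_line(line):
--     tokens = line.strip().split()
--
--     def grab(prefix):
--         # last occurrence wins, so scan the tokens back to front
--         for tok in reversed(tokens):
--             if tok.startswith(prefix):
--                 return tok[len(prefix):]
--         return None
--
--     text_file = grab('TEXT:')
--     if text_file is None:
--         raise ValueError('text file must be present!')
--     return (text_file, grab('IDT:'), grab('ENOTE:'))
-- ===== Notes on version B (the rewrite author's own statement) =====
-- stated objective: alternative
-- what changed: Replaces A's single forward pass that threads three accumulator variables through three elif branches by three independent staged back-to-front scans, one per key, each returning the last matching token directly (correct because no token can bear two of the distinct prefixes).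
import Mathlib
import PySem

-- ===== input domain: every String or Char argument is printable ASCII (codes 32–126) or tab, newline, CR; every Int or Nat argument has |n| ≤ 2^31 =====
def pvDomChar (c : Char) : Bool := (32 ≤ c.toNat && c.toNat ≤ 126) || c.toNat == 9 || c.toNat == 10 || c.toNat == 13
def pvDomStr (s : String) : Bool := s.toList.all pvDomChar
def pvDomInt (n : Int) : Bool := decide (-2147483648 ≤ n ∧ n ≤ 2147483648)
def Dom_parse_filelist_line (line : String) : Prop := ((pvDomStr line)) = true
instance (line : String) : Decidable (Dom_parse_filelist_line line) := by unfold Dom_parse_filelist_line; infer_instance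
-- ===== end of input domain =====

-- B replaces A's single forward pass threading three accumulators through elif branches
-- by three independent back-to-front scans, one per key (last occurrence wins);
-- objective: alternative structure, same cost.

-- ===== PORT A =====
-- one iteration of A's loop over the three accumulators (text, idt, enote)
def parseAStep (st : Option String × Option String × Option String) (file : String) :
    Option String × Option String × Option String :=
  if PySem.Str.startswith file "TEXT:" then
    (some (PySem.Str.slice file (some (("TEXT:".toList.length : Int))) none), st.2.1, st.2.2)
  else if PySem.Str.startswith file "IDT:" then
    (st.1, some (PySem.Str.slice file (some (("IDT:".toList.length : Int))) none), st.2.2)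
  else if PySem.Str.startswith file "ENOTE:" then
    (st.1, st.2.1, some (PySem.Str.slice file (some (("ENOTE:".toList.length : Int))) none))
  else st

-- A raises ValueError when text_file is still None; those inputs are excluded by Pre_
def parse_filelist_line (line : String) : Option String × Option String × Option String :=
  (PySem.Str.split₀ (PySem.Str.strip line)).foldl parseAStep (none, none, none)

-- ===== PORT B =====
-- B's inner 'grab': scan a token list front to back (B passes the reversed tokens),
-- return the slice after the prefix of the first match
def pvGrab (toks : List String) (pre : String) : Option String :=
  match toks with
  | [] => none
  | t :: rest =>
    if PySem.Str.startswith t pre then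
      some (PySem.Str.slice t (some ((pre.toList.length : Int))) none)
    else pvGrab rest pre

-- B raises ValueError exactly where A does (no TEXT: token); excluded by Pre_
def parse_filelist_line_alt (line : String) : Option String × Option String × Option String :=
  let toks := (PySem.Str.split₀ (PySem.Str.strip line)).reverse
  (pvGrab toks "TEXT:", pvGrab toks "IDT:", pvGrab toks "ENOTE:")

-- ===== PRECONDITION & SPEC =====
-- Pre_ excludes exactly the lines containing no token with the TEXT: prefix,
-- on which the Python A (and B alike) raises ValueError.
def Pre_parse_filelist_line (line : String) : Prop :=
  ∃ t ∈ PySem.Str.split₀ (PySem.Str.strip line), PySem.Str.startswith t "TEXT:" = true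
instance (line : String) : Decidable (Pre_parse_filelist_line line) := by
  unfold Pre_parse_filelist_line; infer_instance
def pvWitness_parse_filelist_line : String := "TEXT:doc.sgm IDT:a.idt"

def Spec_parse_filelist_line (line : String) (out : Option String × Option String × Option String) : Prop := out = parse_filelist_line_alt line
instance (line : String) (out : Option String × Option String × Option String) : Decidable (Spec_parse_filelist_line line out) := by unfold Spec_parse_filelist_line; infer_instance

-- ===== CLAIM =====
def Claim_equal_parse_filelist_line : Prop := ∀ (line : String), Dom_parse_filelist_line line → Pre_parse_filelist_line line → Spec_parse_filelist_line line (parse_filelist_line line)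

-- ===== LEMMAS AND PROOFS =====

-- two distinct prefixes starting with different characters cannot both hold
lemma startswith_excl (l : List Char) (c₁ c₂ : Char) (p₁ p₂ : List Char) (h : c₁ ≠ c₂)
    (h₁ : PySem.Chars.startswith l (c₁ :: p₁) = true) :
    PySem.Chars.startswith l (c₂ :: p₂) = false := by
  cases hb : PySem.Chars.startswith l (c₂ :: p₂)
  · rfl
  · obtain ⟨r₁, e₁⟩ := (PySem.Chars.startswith_iff l (c₁ :: p₁)).mp h₁
    obtain ⟨r₂, e₂⟩ := (PySem.Chars.startswith_iff l (c₂ :: p₂)).mp hb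
    rw [← e₂] at e₁
    simp only [List.cons_append] at e₁
    exact absurd (List.cons.injEq .. ▸ e₁).1 h

lemma pvGrab_append (l₁ l₂ : List String) (pre : String) :
    pvGrab (l₁ ++ l₂) pre = (pvGrab l₁ pre).or (pvGrab l₂ pre) := by
  induction l₁ with
  | nil => simp [pvGrab]
  | cons t rest ih =>
    by_cases h : PySem.Chars.startswith t.toList pre.toList = true
    · simp [pvGrab, h]
    · simp [pvGrab, h, ih]

-- A's step on one token, expressed through B's single-token grab
lemma step_eq (st : Option String × Option String × Option String) (t : String) :
    parseAStep st t =
      ((pvGrab [t] "TEXT:").or st.1, (pvGrab [t] "IDT:").or st.2.1,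
        (pvGrab [t] "ENOTE:").or st.2.2) := by
  by_cases hT : PySem.Chars.startswith t.toList ['T', 'E', 'X', 'T', ':'] = true
  · have hI : PySem.Chars.startswith t.toList ['I', 'D', 'T', ':'] = false :=
      startswith_excl t.toList 'T' 'I' _ _ (by decide) hT
    have hE : PySem.Chars.startswith t.toList ['E', 'N', 'O', 'T', 'E', ':'] = false :=
      startswith_excl t.toList 'T' 'E' _ _ (by decide) hT
    simp [parseAStep, pvGrab, hT, hI, hE]
  · by_cases hI : PySem.Chars.startswith t.toList ['I', 'D', 'T', ':'] = true
    · have hE : PySem.Chars.startswith t.toList ['E', 'N', 'O', 'T', 'E', ':'] = false :=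
        startswith_excl t.toList 'I' 'E' _ _ (by decide) hI
      simp [parseAStep, pvGrab, hT, hI, hE]
    · by_cases hE : PySem.Chars.startswith t.toList ['E', 'N', 'O', 'T', 'E', ':'] = true
      · simp [parseAStep, pvGrab, hT, hI, hE]
      · simp [parseAStep, pvGrab, hT, hI, hE]

-- loop invariant: A's fold equals B's three back-to-front scans over any start state
lemma fold_eq (toks : List String) (st : Option String × Option String × Option String) :
    toks.foldl parseAStep st =
      ((pvGrab toks.reverse "TEXT:").or st.1, (pvGrab toks.reverse "IDT:").or st.2.1,
        (pvGrab toks.reverse "ENOTE:").or st.2.2) := by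
  induction toks generalizing st with
  | nil => simp [pvGrab]
  | cons t rest ih =>
    simp only [List.foldl_cons, List.reverse_cons, pvGrab_append]
    rw [ih (parseAStep st t), step_eq]
    simp [Option.or_assoc]

-- ===== VERDICT =====
theorem parse_filelist_line_spec : Claim_equal_parse_filelist_line := by
  intro line _ _
  unfold Spec_parse_filelist_line parse_filelist_line parse_filelist_line_alt
  rw [fold_eq]
  simp
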